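-- pv_equiv track=rewrite | github.com/srghma/purescript-deku-nextui | lint_module_names_are_eq_to_paths.py | filepaths_to_dict_of_root_and_relative_paths
-- ===== SOURCE A (Python) =====
-- def filepaths_to_dict_of_root_and_relative_paths(list_of_known_root_dirs, filepaths):
--     def find_root_or_this_file(list_of_known_root_dirs, filepath):
--         for root in list_of_known_root_dirs:
--             if filepath.startswith(root + "/"):
--                 return root
--         return False
--
--     known_files_dict = {}
--     unknown_files_list = []
--     for filepath in filepaths:
--         root_or_a_filepath = find_root_or_this_file(list_of_known_root_dirs, filepath)
--         if root_or_a_filepath == False: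
--             unknown_files_list.append(filepath)
--         else:
--             relative_filepath = filepath[len(root_or_a_filepath)+1:]
--             if root_or_a_filepath not in known_files_dict:
--                 known_files_dict[root_or_a_filepath] = []
--             known_files_dict[root_or_a_filepath].append(relative_filepath)
--
--     return known_files_dict, unknown_files_list
-- ===== SOURCE B (Python) =====
-- def filepaths_to_dict_of_root_and_relative_paths(list_of_known_root_dirs, filepaths):
--     # Phase 1: roots as the OUTER loop, claiming filepaths by position.
--     n = len(filepaths)
--     assign = [None] * n
--     for root in list_of_known_root_dirs:
--         prefix = root + "/"
--         for i in range(n):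
--             if assign[i] is None and filepaths[i].startswith(prefix):
--                 assign[i] = (root, filepaths[i][len(prefix):])
--     # Phase 2: group the claimed paths, keys in first-claim order.
--     matched = [a for a in assign if a is not None]
--     keys = list(dict.fromkeys(r for r, _ in matched))
--     known_files_dict = {r: [rel for r2, rel in matched if r2 == r] for r in keys}
--     unknown_files_list = [fp for fp, a in zip(filepaths, assign) if a is None]
--     return known_files_dict, unknown_files_list
-- ===== Notes on version B (the rewrite author's own statement) =====
-- stated objective: alternative
-- what changed: Reverses the loop nesting: B iterates roots as the outer loop over a positional 'claimed' mask instead of scanning roots per filepath, then builds the groups and the unknown list in a separate grouping phase.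
import Mathlib
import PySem

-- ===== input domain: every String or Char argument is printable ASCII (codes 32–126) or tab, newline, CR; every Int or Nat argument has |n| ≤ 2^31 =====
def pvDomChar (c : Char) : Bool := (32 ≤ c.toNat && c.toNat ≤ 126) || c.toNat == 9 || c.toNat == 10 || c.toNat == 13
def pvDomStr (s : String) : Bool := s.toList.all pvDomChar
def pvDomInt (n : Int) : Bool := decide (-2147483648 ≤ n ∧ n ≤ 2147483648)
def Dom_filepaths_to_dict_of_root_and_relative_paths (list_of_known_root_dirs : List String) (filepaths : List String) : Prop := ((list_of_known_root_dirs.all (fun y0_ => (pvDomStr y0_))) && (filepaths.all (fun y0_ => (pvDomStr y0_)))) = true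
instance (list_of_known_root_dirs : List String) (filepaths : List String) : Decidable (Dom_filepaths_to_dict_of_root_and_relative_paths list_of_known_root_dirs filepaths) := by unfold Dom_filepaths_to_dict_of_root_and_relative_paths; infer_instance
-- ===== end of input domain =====

-- B reverses the loop nesting (roots outer, positional claimed-mask, separate grouping phase); same return value, no speed claim.

-- ===== PORT A =====
-- find_root_or_this_file: the Python 'False' sentinel is ported as 'none' (a root string never equals False);
-- root + "/" and the startswith test are ported on the code-point lists (exact).
def pvFindRoot : List String → String → Option String
  | [], _ => none
  | r :: rest, fp =>
      if PySem.Chars.startswith fp.toList (r.toList ++ ['/']) then some r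
      else pvFindRoot rest fp

-- filepath[len(root)+1:] is the code-point drop of len(root)+1 (slice with nonnegative start, exact).
def filepaths_to_dict_of_root_and_relative_paths (list_of_known_root_dirs : List String) (filepaths : List String) : (List (String × List String)) × List String :=
  let st := filepaths.foldl
    (fun (st : PySem.Dict String (List String) × List String) fp =>
      match pvFindRoot list_of_known_root_dirs fp with
      | none => (st.1, st.2 ++ [fp])
      | some r =>
          let rel := String.ofList (fp.toList.drop (r.toList.length + 1))
          let d := if st.1.contains r then st.1 else st.1.insert r []
          (d.modify r [] (fun v => v ++ [rel]), st.2))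
    (PySem.Dict.empty, [])
  (st.1.items, st.2)

-- ===== PORT B =====
-- one claiming step: leave an already-claimed slot alone, else test the prefix
def pvClaimStep (root : String) (fp : String) (a : Option (String × String)) : Option (String × String) :=
  match a with
  | some _ => a
  | none =>
      if PySem.Chars.startswith fp.toList (root.toList ++ ['/'])
      then some (root, String.ofList (fp.toList.drop (root.toList ++ ['/']).length))
      else none

def filepaths_to_dict_of_root_and_relative_paths_alt (list_of_known_root_dirs : List String) (filepaths : List String) : (List (String × List String)) × List String :=
  let assign := list_of_known_root_dirs.foldl
      (fun acc root => List.zipWith (pvClaimStep root) filepaths acc)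
      (filepaths.map (fun _ => (none : Option (String × String))))
  let matched := assign.filterMap id
  let keys := PySem.List.dedup (matched.map (·.1))
  let known := keys.map (fun r => (r, (matched.filter (fun p => p.1 == r)).map (·.2)))
  let unknown := (filepaths.zip assign).filterMap (fun p => if p.2 = none then some p.1 else none)
  (known, unknown)

-- ===== PRECONDITION & SPEC =====
def Spec_filepaths_to_dict_of_root_and_relative_paths (list_of_known_root_dirs : List String) (filepaths : List String) (out : (List (String × List String)) × List String) : Prop := out = filepaths_to_dict_of_root_and_relative_paths_alt list_of_known_root_dirs filepaths
instance (list_of_known_root_dirs : List String) (filepaths : List String) (out : (List (String × List String)) × List String) : Decidable (Spec_filepaths_to_dict_of_root_and_relative_paths list_of_known_root_dirs filepaths out) := by unfold Spec_filepaths_to_dict_of_root_and_relative_paths; infer_instance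

-- ===== CLAIM (what is proved, stated in full; the proofs are below) =====
def Claim_equal_filepaths_to_dict_of_root_and_relative_paths : Prop := ∀ (list_of_known_root_dirs : List String) (filepaths : List String), Dom_filepaths_to_dict_of_root_and_relative_paths list_of_known_root_dirs filepaths → Spec_filepaths_to_dict_of_root_and_relative_paths list_of_known_root_dirs filepaths (filepaths_to_dict_of_root_and_relative_paths list_of_known_root_dirs filepaths)


-- ===== LEMMAS AND PROOFS =====

-- the value A's inner search assigns to a filepath, as an Option pair (root, relative path)
def pvM (roots : List String) (fp : String) : Option (String × String) :=
  (pvFindRoot roots fp).map (fun r => (r, String.ofList (fp.toList.drop (r.toList.length + 1))))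

lemma foldl_claim_some (roots : List String) (fp : String) (x : String × String) :
    roots.foldl (fun a root => pvClaimStep root fp a) (some x) = some x := by
  induction roots with
  | nil => rfl
  | cons r rs ih => simpa [pvClaimStep] using ih

lemma fold_claim (roots : List String) (fp : String) :
    roots.foldl (fun a root => pvClaimStep root fp a) none = pvM roots fp := by
  induction roots with
  | nil => rfl
  | cons r rs ih =>
      rw [List.foldl_cons]
      by_cases h : PySem.Chars.startswith fp.toList (r.toList ++ ['/']) = true
      · have h1 : pvClaimStep r fp none
            = some (r, String.ofList (fp.toList.drop (r.toList.length + 1))) := by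
          simp [pvClaimStep, h]
        rw [h1, foldl_claim_some]
        simp [pvM, pvFindRoot, h]
      · have h1 : pvClaimStep r fp none = none := by simp [pvClaimStep, h]
        rw [h1, ih]
        simp [pvM, pvFindRoot, h]

lemma zipWith_self_map {α β : Type} (f : α → α → β) : ∀ (l : List α),
    List.zipWith f l l = l.map (fun x => f x x)
  | [] => rfl
  | x :: xs => by simp [zipWith_self_map f xs]

lemma assign_eq (roots fps : List String) (h : String → Option (String × String)) :
    roots.foldl (fun acc root => List.zipWith (pvClaimStep root) fps acc) (fps.map h)
      = fps.map (fun fp => roots.foldl (fun a root => pvClaimStep root fp a) (h fp)) := by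
  induction roots generalizing h with
  | nil => rfl
  | cons r rs ih =>
      rw [List.foldl_cons, List.zipWith_map_right, zipWith_self_map]
      exact ih (fun fp => pvClaimStep r fp (h fp))

lemma zip_map_filterMap (m : String → Option (String × String)) (fps : List String) :
    (fps.zip (fps.map m)).filterMap (fun p => if p.2 = none then some p.1 else none)
      = fps.filter (fun fp => (m fp).isNone) := by
  induction fps with
  | nil => rfl
  | cons fp rest ih =>
      rw [List.map_cons, List.zip_cons_cons, List.filterMap_cons, List.filter_cons]
      cases h : m fp with
      | none => simp [h, ih]
      | some v => simp [h, ih]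

lemma setdefault_modify (d : PySem.Dict String (List String)) (r : String)
    (f : List String → List String) :
    ((if d.contains r then d else d.insert r []).modify r [] f) = d.modify r [] f := by
  by_cases h : d.contains r = true
  · rw [if_pos h]
  · rw [if_neg (by simp [h])]
    simp [PySem.Dict.modify, PySem.Dict.getD_insert_self, PySem.Dict.insert_insert_self,
          PySem.Dict.getD_of_not_contains, h]

lemma loopA (roots : List String) (fps : List String)
    (d : PySem.Dict String (List String)) (u : List String) :
    fps.foldl
      (fun (st : PySem.Dict String (List String) × List String) fp =>
        match pvFindRoot roots fp with
        | none => (st.1, st.2 ++ [fp])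
        | some r =>
            let rel := String.ofList (fp.toList.drop (r.toList.length + 1))
            let d := if st.1.contains r then st.1 else st.1.insert r []
            (d.modify r [] (fun v => v ++ [rel]), st.2))
      (d, u)
    = ( ((fps.map (pvM roots)).filterMap id).foldl
          (fun d p => d.modify p.1 [] (· ++ [p.2])) d,
        u ++ fps.filter (fun fp => (pvM roots fp).isNone) ) := by
  induction fps generalizing d u with
  | nil => simp
  | cons fp rest ih =>
      rw [List.foldl_cons]
      cases h : pvFindRoot roots fp with
      | none =>
          have hm : pvM roots fp = none := by simp [pvM, h]
          refine (ih d (u ++ [fp])).trans ?_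
          simp [hm, List.filter_cons]
      | some r =>
          have hm : pvM roots fp
              = some (r, String.ofList (fp.toList.drop (r.toList.length + 1))) := by
            simp [pvM, h]
          refine (ih ((if d.contains r then d else d.insert r []).modify r []
              (fun v => v ++ [String.ofList (fp.toList.drop (r.toList.length + 1))])) u).trans ?_
          rw [setdefault_modify]
          simp [hm, List.filter_cons]

-- ===== VERDICT (by name: the statement is the Claim_ definition above) =====
theorem filepaths_to_dict_of_root_and_relative_paths_spec : Claim_equal_filepaths_to_dict_of_root_and_relative_paths := by
  intro roots fps _
  unfold Spec_filepaths_to_dict_of_root_and_relative_paths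
  unfold filepaths_to_dict_of_root_and_relative_paths filepaths_to_dict_of_root_and_relative_paths_alt
  simp only [assign_eq, fold_claim, loopA, zip_map_filterMap, List.nil_append]
  have hnd : ((((fps.map (pvM roots)).filterMap id).foldl
      (fun d p => d.modify p.1 [] (· ++ [p.2])) PySem.Dict.empty)).keys.Nodup := by
    apply PySem.Dict.nodup_keys_foldl_modify_key
    simp
  rw [PySem.Dict.items_eq_map_keys _ hnd ([] : List String)]
  rw [PySem.Dict.keys_foldl_modify_key]
  simp only [PySem.Dict.getD_foldl_modify_append, PySem.Dict.getD_empty,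
    PySem.Dict.keys_empty, PySem.Set.update_nil_left, PySem.List.dedup_eq_ofList,
    List.nil_append]
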